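-- pv_equiv track=rewrite | github.com/Aanurag2403/problem_set | 01_simple_no/05.py | kth_larg
-- ===== SOURCE A (Python) =====
-- def kth_larg(n,k):
--     n = abs(n)
--     digit = set()
--     if n == 0:
--         digit.add(0)
--     while (n > 0):
--         digit.add(n %10)
--         n = n//10
--     if len(digit)<k:
--         return None
--     sorted_digits = sorted(digit ,reverse=True)
--     return sorted_digits[k-1]
-- ===== SOURCE B (Python) =====
-- def kth_larg(n, k):
--     s = str(abs(n))
--     present = [d for d in range(9, -1, -1) if str(d) in s]
--     if len(present) < k:
--         return None
--     return present[k - 1]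
-- ===== Notes on version B (the rewrite author's own statement) =====
-- stated objective: idiomatic
-- what changed: A extracts digits with a mod/div loop into a set and sorts them descending; B scans the fixed candidate domain 9..0 once and keeps each digit whose character occurs in str(abs(n)), which is already the descending distinct-digit list, so the sort disappears.
import Mathlib
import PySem

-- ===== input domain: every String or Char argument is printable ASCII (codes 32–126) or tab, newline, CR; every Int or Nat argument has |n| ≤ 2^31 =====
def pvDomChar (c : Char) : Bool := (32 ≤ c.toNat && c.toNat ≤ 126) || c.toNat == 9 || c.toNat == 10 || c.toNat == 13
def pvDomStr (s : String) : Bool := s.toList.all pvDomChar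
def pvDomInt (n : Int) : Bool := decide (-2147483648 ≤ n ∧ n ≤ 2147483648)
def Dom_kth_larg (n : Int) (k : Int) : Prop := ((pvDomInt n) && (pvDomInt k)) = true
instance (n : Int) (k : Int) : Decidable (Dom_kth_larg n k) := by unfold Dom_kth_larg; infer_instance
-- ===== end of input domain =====

-- B replaces A's modulo-extraction loop + set + descending sort by a single scan of the
-- fixed candidate domain 9..0 with a string-membership test (idiomatic; no sort needed).

-- ===== PORT A =====
-- the 'while n > 0: digit.add(n % 10); n = n // 10' loop of A
def pvDigitLoop (n : Int) (s : PySem.Set Int) : PySem.Set Int :=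
  if 0 < n then pvDigitLoop (PySem.Int.floordiv n 10) (PySem.Set.add s (PySem.Int.mod n 10)) else s
termination_by n.toNat
decreasing_by
  have h10 : (0:Int) < 10 := by omega
  rw [PySem.Int.floordiv_eq_ediv_of_pos h10]
  omega

def kth_larg (n : Int) (k : Int) : Option Int :=
  let m := |n|
  let digit0 : PySem.Set Int := PySem.Set.empty
  let digit1 := if m = 0 then PySem.Set.add digit0 0 else digit0
  let digit := pvDigitLoop m digit1
  if PySem.Set.len digit < k then none
  else
    let sorted_digits := PySem.List.sorted digit (fun x => x) true
    PySem.List.pyGet? sorted_digits (k - 1)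

-- ===== PORT B =====
def kth_larg_alt (n : Int) (k : Int) : Option Int :=
  let s := PySem.Int.toStr |n|
  let present := (PySem.List.pyRange 9 (-1) (-1)).filter
    (fun d => PySem.Str.isIn (PySem.Int.toStr d) s)
  if PySem.List.len present < k then none
  else PySem.List.pyGet? present (k - 1)

-- ===== PRECONDITION & SPEC =====
-- Pre_ excludes exactly the inputs where A raises IndexError: k ≤ -(number of distinct
-- decimal digits of |n|), where sorted_digits[k-1] is an out-of-range negative index.
def Pre_kth_larg (n : Int) (k : Int) : Prop :=
  1 - (if n = 0 then 1 else ((Nat.digits 10 n.natAbs).dedup.length : Int)) ≤ k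
instance (n : Int) (k : Int) : Decidable (Pre_kth_larg n k) := by unfold Pre_kth_larg; infer_instance

def pvWitness_kth_larg : Int × Int := (907, 2)

def Spec_kth_larg (n : Int) (k : Int) (out : Option Int) : Prop := out = kth_larg_alt n k
instance (n : Int) (k : Int) (out : Option Int) : Decidable (Spec_kth_larg n k out) := by unfold Spec_kth_larg; infer_instance

-- ===== CLAIM (what is proved, stated in full; the proofs are below) =====
def Claim_equal_kth_larg : Prop := ∀ (n : Int) (k : Int), Dom_kth_larg n k → Pre_kth_larg n k → Spec_kth_larg n k (kth_larg n k)

-- ===== LEMMAS AND PROOFS =====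

-- decimal digits of m, least significant first; natDigits 0 = [0]
def natDigits (m : Nat) : List Nat :=
  m % 10 :: (if h : m / 10 = 0 then [] else natDigits (m / 10))
termination_by m
decreasing_by omega

theorem natDigits_lt_ten (m : Nat) : ∀ x ∈ natDigits m, x < 10 := by
  induction m using Nat.strong_induction_on with
  | _ m ih =>
    intro x hx
    rw [natDigits] at hx
    rcases List.mem_cons.1 hx with h | h
    · omega
    · split at h
      · simp at h
      · exact ih (m / 10) (by omega) x h

theorem toDigitsCore_eq (f : Nat) : ∀ (m : Nat) (acc : List Char), m < f →
    Nat.toDigitsCore 10 f m acc = ((natDigits m).map Nat.digitChar).reverse ++ acc := by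
  induction f with
  | zero => intro m acc h; omega
  | succ f ih =>
    intro m acc h
    rw [Nat.toDigitsCore, natDigits]
    by_cases h0 : m / 10 = 0
    · simp [h0]
    · simp only [h0]
      rw [ih (m / 10) _ (by omega)]
      simp

theorem toChars_nat (m : Nat) :
    PySem.Int.toChars (m : Int) = ((natDigits m).map Nat.digitChar).reverse := by
  rw [PySem.Int.toChars]
  rw [if_neg (by omega)]
  rw [Nat.toDigits, Int.toNat_natCast, toDigitsCore_eq (m + 1) m [] (by omega)]
  simp

theorem digitChar_inj (a b : Nat) (ha : a < 10) (hb : b < 10) (h : Nat.digitChar a = Nat.digitChar b) : a = b := by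
  interval_cases a <;> interval_cases b <;> simp_all [Nat.digitChar]

theorem singleton_infix {α : Type} (c : α) (l : List α) : [c] <:+: l ↔ c ∈ l := by
  constructor
  · intro h
    exact (List.singleton_sublist).1 h.sublist
  · intro h
    obtain ⟨s, t, rfl⟩ := List.append_of_mem h
    exact ⟨s, t, by simp⟩

-- the B-side membership test, characterised
theorem isIn_char (d : Int) (hd : 0 ≤ d) (hd9 : d ≤ 9) (m : Nat) :
    PySem.Str.isIn (PySem.Int.toStr d) (PySem.Int.toStr (m : Int)) = true ↔ d.toNat ∈ natDigits m := by
  rw [PySem.Str.isIn_iff_infix, PySem.Int.toList_toStr, PySem.Int.toList_toStr, toChars_nat]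
  have hsingle : PySem.Int.toChars d = [Nat.digitChar d.toNat] := by
    interval_cases d <;> rfl
  rw [hsingle, singleton_infix]
  rw [List.mem_reverse, List.mem_map]
  constructor
  · rintro ⟨x, hx, hxc⟩
    have hx10 := natDigits_lt_ten m x hx
    have : x = d.toNat := digitChar_inj x d.toNat hx10 (by omega) hxc
    exact this ▸ hx
  · intro h
    exact ⟨d.toNat, h, rfl⟩

-- the A-side loop, characterised
theorem pvDigitLoop_zero (s : PySem.Set Int) : pvDigitLoop 0 s = s := by
  rw [pvDigitLoop]; simp

theorem pvDigitLoop_eq (m : Nat) : ∀ (s : PySem.Set Int), 0 < m →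
    pvDigitLoop (m : Int) s = ((natDigits m).map Int.ofNat).foldl PySem.Set.add s := by
  induction m using Nat.strong_induction_on with
  | _ m ih =>
    intro s hm
    rw [pvDigitLoop, if_pos (by exact_mod_cast hm)]
    rw [show ((10:Int)) = ((10:Nat):Int) from rfl, PySem.Int.floordiv_natCast, PySem.Int.mod_natCast]
    rw [natDigits]
    by_cases h0 : m / 10 = 0
    · rw [h0]; simp [pvDigitLoop_zero]
    · rw [dif_neg h0, ih (m / 10) (by omega) _ (by omega)]
      simp

theorem natDigits_zero : natDigits 0 = [0] := by rw [natDigits]; norm_num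

-- the set A builds, as an explicit ofList
theorem digitSet_eq (n : Int) :
    pvDigitLoop |n| (if |n| = 0 then PySem.Set.add PySem.Set.empty 0 else PySem.Set.empty) =
      PySem.Set.ofList ((natDigits n.natAbs).map Int.ofNat) := by
  rcases eq_or_ne n 0 with rfl | hn
  · rw [abs_zero, if_pos rfl, pvDigitLoop_zero, Int.natAbs_zero, natDigits_zero]
    rfl
  · have h1 : |n| = ((n.natAbs : Nat) : Int) := Int.abs_eq_natAbs n
    have h2 : ¬ (|n| = 0) := by simpa using hn
    rw [if_neg h2, h1, pvDigitLoop_eq n.natAbs PySem.Set.empty (by omega),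
      PySem.Set.ofList_eq_foldl]
    rfl

-- the central fact: A's sorted set equals B's filtered countdown list
theorem sorted_eq_present (n : Int) :
    PySem.List.sorted (PySem.Set.ofList ((natDigits n.natAbs).map Int.ofNat)) (fun x => x) true =
      (PySem.List.pyRange 9 (-1) (-1)).filter (fun d => PySem.Str.isIn (PySem.Int.toStr d) (PySem.Int.toStr |n|)) := by
  have hrange : PySem.List.pyRange 9 (-1) (-1) = [9,8,7,6,5,4,3,2,1,0] := by decide
  have habs : |n| = ((n.natAbs : Nat) : Int) := Int.abs_eq_natAbs n
  set S := PySem.Set.ofList ((natDigits n.natAbs).map Int.ofNat) with hS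
  set pres := (PySem.List.pyRange 9 (-1) (-1)).filter (fun d => PySem.Str.isIn (PySem.Int.toStr d) (PySem.Int.toStr |n|)) with hpres
  have hmemS : ∀ x : Int, x ∈ S ↔ (0 ≤ x ∧ x ≤ 9 ∧ x.toNat ∈ natDigits n.natAbs) := by
    intro x
    simp only [hS, PySem.Set.mem_ofList, List.mem_map]
    constructor
    · rintro ⟨y, hy, hyx⟩
      have hyx' : (y : Int) = x := hyx
      have h10 := natDigits_lt_ten n.natAbs y hy
      refine ⟨by omega, by omega, ?_⟩
      have hxy : x.toNat = y := by omega
      exact hxy ▸ hy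
    · rintro ⟨h0, h9, hmem⟩
      exact ⟨x.toNat, hmem, by exact_mod_cast Int.toNat_of_nonneg h0⟩
  have hmemP : ∀ x : Int, x ∈ pres ↔ (0 ≤ x ∧ x ≤ 9 ∧ x.toNat ∈ natDigits n.natAbs) := by
    intro x
    rw [hpres, List.mem_filter, hrange]
    constructor
    · rintro ⟨hx, hf⟩
      have hx09 : 0 ≤ x ∧ x ≤ 9 := by
        simp only [List.mem_cons, List.not_mem_nil, or_false] at hx
        rcases hx with h|h|h|h|h|h|h|h|h|h <;> omega
      rw [habs, isIn_char x hx09.1 hx09.2] at hf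
      exact ⟨hx09.1, hx09.2, hf⟩
    · rintro ⟨h0, h9, hmem⟩
      refine ⟨by simp only [List.mem_cons]; omega, ?_⟩
      rw [habs, isIn_char x h0 h9]
      exact hmem
  have hperm : pres.Perm S := by
    have hnodupP : pres.Nodup := by
      rw [hpres, hrange]
      exact List.Nodup.filter _ (by decide)
    rw [List.perm_ext_iff_of_nodup hnodupP (PySem.Set.nodup_ofList _)]
    intro a; rw [hmemP, hmemS]
  have hpw : pres.Pairwise (fun a b : Int => b < a) := by
    rw [hpres, hrange]
    exact List.Pairwise.filter _ (by decide)
  exact PySem.List.sorted_rev_eq_of_perm_of_pairwise_gt S pres (fun x => x) hperm hpw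

theorem len_set_eq_len_present (n : Int) :
    PySem.Set.len (PySem.Set.ofList ((natDigits n.natAbs).map Int.ofNat)) =
      PySem.List.len ((PySem.List.pyRange 9 (-1) (-1)).filter (fun d => PySem.Str.isIn (PySem.Int.toStr d) (PySem.Int.toStr |n|))) := by
  have h := congrArg List.length (sorted_eq_present n)
  rw [PySem.List.length_sorted] at h
  rw [PySem.Set.len, PySem.List.len_eq, h]

-- ===== VERDICT (by name: the statement is the Claim_ definition above) =====
theorem kth_larg_spec : Claim_equal_kth_larg := by
  intro n k _ _
  unfold Spec_kth_larg kth_larg kth_larg_alt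
  dsimp only
  rw [digitSet_eq n, sorted_eq_present n, len_set_eq_len_present n]
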